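-- pv_equiv track=rewrite | github.com/aconconi/advent-of-code-2023 | aoc2023_day05.py | day05_part2
-- ===== SOURCE A (Python) =====
-- from functools import reduce
--
-- def grouper(n, iterable):
--     args = [iter(iterable)] * n
--     return zip(*args)
--
-- def convert_range(
--     ranges: list[tuple[int, int]], rules: list[tuple[int, int, int]]
-- ) -> list[tuple[int, int]]:
--     locations = []
--
--     for dest_start, source_start, size in rules:
--         source_end = source_start + size
--         new_ranges = []
--
--         for a, b in ranges:
--             before = (a, min(b, source_start))
--             inter = (max(a, source_start), min(source_end, b))
--             after = (max(source_end, a), b)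
--
--             new_ranges.extend(
--                 interval for interval in [before, after] if interval[1] > interval[0]
--             )
--
--             locations.extend(
--                 (
--                     inter[0] - source_start + dest_start,
--                     inter[1] - source_start + dest_start,
--                 )
--                 for inter in [inter]
--                 if inter[1] > inter[0]
--             )
--         ranges = new_ranges
--
--     return locations + ranges
--
-- def day05_part2(data):
--     seeds, sections = data
--
--     def min_location_seed_range(seed_range: tuple[int, int]) -> int:
--         start_seed, size = seed_range
--         return min(reduce(convert_range, sections, [(start_seed, start_seed + size)]))[
--             0
--         ]
--
--     return min(min_location_seed_range(seed_range) for seed_range in grouper(2, seeds))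
-- ===== SOURCE B (Python) =====
-- def _pairs(seeds):
--     if len(seeds) < 2:
--         return []
--     return [(seeds[0], seeds[1])] + _pairs(seeds[2:])
--
--
-- def day05_part2(data):
--     seeds, sections = data
--     results = []
--     for start, size in _pairs(seeds):
--         segs = [(start, start + size)]
--         for rules in sections:
--             out = []
--             for a, b in segs:
--                 cuts = sorted({p for _, s, z in rules for p in (s, s + z) if a < p < b})
--                 pts = [a] + cuts + [b]
--                 for lo, hi in zip(pts, pts[1:]):
--                     shift = 0
--                     for d, s, z in rules:
--                         if s <= lo < s + z:
--                             shift = d - s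
--                             break
--                     out.append((lo + shift, hi + shift))
--             segs = out
--         results.append(min(lo for lo, _ in segs))
--     return min(results)
-- ===== Notes on version B (the rewrite author's own statement) =====
-- stated objective: faster
-- what changed: convert_range's iterative carving of every range by every rule (rebuilding the whole range list once per rule and accumulating mapped pieces) is replaced by boundary splitting: each segment is cut once at the sorted set of rule boundaries inside it and every sub-segment is shifted by the first rule in list order that contains it (identity otherwise), and the final answer takes the min of segment starts directly instead of a lexicographic min of tuples.
import Mathlib
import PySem

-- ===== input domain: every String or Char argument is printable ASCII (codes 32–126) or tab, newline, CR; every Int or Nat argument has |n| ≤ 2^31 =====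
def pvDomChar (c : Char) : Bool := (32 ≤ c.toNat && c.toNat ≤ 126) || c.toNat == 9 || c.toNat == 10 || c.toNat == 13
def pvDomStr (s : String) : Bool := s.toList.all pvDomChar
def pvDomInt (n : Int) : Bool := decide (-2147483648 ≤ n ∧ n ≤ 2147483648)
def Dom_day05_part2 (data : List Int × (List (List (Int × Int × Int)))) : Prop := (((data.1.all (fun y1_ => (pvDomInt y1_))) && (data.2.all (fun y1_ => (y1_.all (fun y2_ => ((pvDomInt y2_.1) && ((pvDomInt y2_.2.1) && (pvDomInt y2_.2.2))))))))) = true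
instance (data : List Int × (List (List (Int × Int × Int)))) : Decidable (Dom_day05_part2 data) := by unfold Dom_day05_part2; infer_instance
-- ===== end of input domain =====

-- B replaces A's per-rule iterative carving by boundary splitting (cut each segment once at
-- the rule boundaries inside it, shift each piece by the first covering rule) and takes the
-- min of segment starts directly, avoiding A's per-rule rebuilding of the range list.
-- Equivalence is proved on Pre_ (inputs where A's min() never sees an empty list).

-- ===== PORT A =====
-- grouper(2, seeds): pairs of consecutive seeds, truncating a leftover element
def seedPairs : List Int → List (Int × Int)
  | a :: b :: rest => (a, b) :: seedPairs rest
  | _ => []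

-- inner 'for a, b in ranges' loop of convert_range, for one rule (dest, src, src+size):
-- returns (locations contributed, new_ranges)
def carveA (dest src send : Int) : List (Int × Int) → List (Int × Int) × List (Int × Int)
  | [] => ([], [])
  | (a, b) :: rest =>
      let before := (a, min b src)
      let inter := (max a src, min send b)
      let after := (max send a, b)
      let (locs, nrs) := carveA dest src send rest
      ((if inter.1 < inter.2 then [(inter.1 - src + dest, inter.2 - src + dest)] else []) ++ locs,
       ((if before.1 < before.2 then [before] else []) ++ (if after.1 < after.2 then [after] else [])) ++ nrs)

-- outer 'for dest_start, source_start, size in rules' loop: accumulates locations, threads ranges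
def rulesLoopA (ranges : List (Int × Int)) : List (Int × Int × Int) → List (Int × Int) × List (Int × Int)
  | [] => ([], ranges)
  | (dest, src, size) :: rest =>
      let step := carveA dest src (src + size) ranges
      let tailRes := rulesLoopA step.2 rest
      (step.1 ++ tailRes.1, tailRes.2)

def convertRange (ranges : List (Int × Int)) (rules : List (Int × Int × Int)) : List (Int × Int) :=
  let res := rulesLoopA ranges rules
  res.1 ++ res.2

-- Python tuple comparison (lexicographic) and min() over a list of pairs (none = ValueError)
def lexLt (p q : Int × Int) : Bool := p.1 < q.1 || (p.1 == q.1 && p.2 < q.2)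

def minPair? (l : List (Int × Int)) : Option (Int × Int) :=
  match l with
  | [] => none
  | x :: t => some (t.foldl (fun m y => if lexLt y m then y else m) x)

-- min_location_seed_range: reduce(convert_range, sections, [(s, s+size)]) then min(...)[0]
def minLocA (sections : List (List (Int × Int × Int))) (sr : Int × Int) : Option Int :=
  let final := sections.foldl convertRange [(sr.1, sr.1 + sr.2)]
  (minPair? final).map Prod.fst

-- Python's outer min over the generator; none propagates a ValueError of an inner min
def day05_part2 (data : List Int × (List (List (Int × Int × Int)))) : Int :=
  match (seedPairs data.1).map (minLocA data.2) with
  | [] => 0          -- min() of an empty generator raises; excluded by Pre_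
  | v :: vs =>
      (vs.foldl (fun acc w =>
          match acc, w with
          | some m, some x => some (if x < m then x else m)
          | _, _ => none) v).getD 0

-- ===== PORT B =====
-- first rule in list order whose [s, s+z) contains lo gives shift d - s; identity otherwise
def shiftFor : List (Int × Int × Int) → Int → Int
  | [], _ => 0
  | (d, s, z) :: rest, lo => if s ≤ lo ∧ lo < s + z then d - s else shiftFor rest lo

-- sorted({s, s+z for rules} strictly inside (a, b))
def cutsB (rules : List (Int × Int × Int)) (a b : Int) : List Int :=
  PySem.List.sorted
    (PySem.Set.ofList
      ((rules.flatMap (fun r => [r.2.1, r.2.1 + r.2.2])).filter (fun p => a < p && p < b)))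
    (fun x => x) false

-- 'for lo, hi in zip(pts, pts[1:]): out.append((lo+shift, hi+shift))'
def zipShift (rules : List (Int × Int × Int)) (pts : List Int) : List (Int × Int) :=
  (pts.zip pts.tail).map (fun p => (p.1 + shiftFor rules p.1, p.2 + shiftFor rules p.1))

def mapSeg (rules : List (Int × Int × Int)) (a b : Int) : List (Int × Int) :=
  zipShift rules (a :: (cutsB rules a b ++ [b]))

def convertB (segs : List (Int × Int)) (rules : List (Int × Int × Int)) : List (Int × Int) :=
  segs.foldl (fun out ab => out ++ mapSeg rules ab.1 ab.2) []

-- min(lo for lo, _ in segs)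
def minStartB (segs : List (Int × Int)) : Int :=
  match segs with
  | [] => 0          -- unreachable inside Pre_ (min of an empty generator)
  | p :: t => t.foldl (fun m q => min m q.1) p.1

def day05_part2_alt (data : List Int × (List (List (Int × Int × Int)))) : Int :=
  let results := (seedPairs data.1).map (fun sr =>
      minStartB (data.2.foldl convertB [(sr.1, sr.1 + sr.2)]))
  match results with
  | [] => 0          -- unreachable inside Pre_ (min of an empty list)
  | r :: rest => rest.foldl min r

-- ===== PRECONDITION & SPEC =====
-- Pre_ is exactly where A's min() calls never see an empty list: at least one seed pair, and
-- either every pair has positive size or every section carries no rules (otherwise a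
-- degenerate range vanishes during carving and A raises ValueError).
def Pre_day05_part2 (data : List Int × (List (List (Int × Int × Int)))) : Prop :=
  2 ≤ data.1.length ∧
    ((∀ z ∈ data.1.zipIdx, z.2 % 2 = 1 → 0 < z.1) ∨ (∀ sec ∈ data.2, sec = []))

instance (data : List Int × (List (List (Int × Int × Int)))) : Decidable (Pre_day05_part2 data) := by
  unfold Pre_day05_part2; infer_instance

def pvWitness_day05_part2 : (List Int × (List (List (Int × Int × Int)))) :=
  ([79, 14, 55, 13], [[(50, 98, 2), (52, 50, 48)], []])

def Spec_day05_part2 (data : List Int × (List (List (Int × Int × Int)))) (out : Int) : Prop := out = day05_part2_alt data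
instance (data : List Int × (List (List (Int × Int × Int)))) (out : Int) : Decidable (Spec_day05_part2 data out) := by unfold Spec_day05_part2; infer_instance

-- ===== CLAIM (what is proved, stated in full; the proofs are below) =====
def Claim_equal_day05_part2 : Prop := ∀ (data : List Int × (List (List (Int × Int × Int)))), Dom_day05_part2 data → Pre_day05_part2 data → Spec_day05_part2 data (day05_part2 data)

-- ===== LEMMAS AND PROOFS =====

-- the set of integers covered by a list of half-open intervals
def Cov (L : List (Int × Int)) (x : Int) : Prop := ∃ p ∈ L, p.1 ≤ x ∧ x < p.2

theorem Cov_append (L M : List (Int × Int)) (x : Int) :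
    Cov (L ++ M) x ↔ Cov L x ∨ Cov M x := by
  simp [Cov, List.mem_append, or_and_right, exists_or]

theorem Cov_cons (p : Int × Int) (L : List (Int × Int)) (x : Int) :
    Cov (p :: L) x ↔ (p.1 ≤ x ∧ x < p.2) ∨ Cov L x := by
  simp [Cov]

-- what A's first-rule carve keeps uncovered
theorem carveA_nrs_cov (d s e : Int) (rs : List (Int × Int)) (x : Int) :
    Cov (carveA d s e rs).2 x ↔ Cov rs x ∧ ¬(s ≤ x ∧ x < e) := by
  induction rs with
  | nil => simp [carveA, Cov]
  | cons hd rest ih =>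
      obtain ⟨a, b⟩ := hd
      by_cases hr : Cov rest x <;>
        simp only [carveA, Cov_append, Cov_cons, ih, hr] <;>
        split_ifs <;> simp [Cov] <;> omega

theorem Cov_interShift (d s e a b x : Int) :
    Cov (if max a s < min e b then [(max a s - s + d, min e b - s + d)] else []) x ↔
      ∃ y, (a ≤ y ∧ y < b) ∧ (s ≤ y ∧ y < e) ∧ x = y - s + d := by
  constructor
  · intro h
    refine ⟨x - d + s, ?_⟩
    by_cases hg : max a s < min e b <;> simp [hg, Cov] at h <;> omega
  · rintro ⟨y, hy⟩
    have hg : max a s < min e b := by omega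
    simp [hg, Cov]
    omega

-- what A's first-rule carve maps into locations
theorem carveA_locs_cov (d s e : Int) (rs : List (Int × Int)) (x : Int) :
    Cov (carveA d s e rs).1 x ↔ ∃ y, Cov rs y ∧ (s ≤ y ∧ y < e) ∧ x = y - s + d := by
  induction rs with
  | nil => simp [carveA, Cov]
  | cons hd rest ih =>
      obtain ⟨a, b⟩ := hd
      simp only [carveA, Cov_append, ih, Cov_interShift, Cov_cons, ← exists_or, or_and_right]

-- the piecewise map a rules list denotes: first matching rule, else identity
def applyA : List (Int × Int × Int) → Int → Int
  | [], y => y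
  | (d, s, z) :: rest, y => if s ≤ y ∧ y < s + z then y - s + d else applyA rest y

theorem applyA_eq_shift (rules : List (Int × Int × Int)) (y : Int) :
    applyA rules y = y + shiftFor rules y := by
  induction rules with
  | nil => simp [applyA, shiftFor]
  | cons r rest ih =>
      obtain ⟨d, s, z⟩ := r
      by_cases h : s ≤ y ∧ y < s + z <;> simp [applyA, shiftFor, h, ih] <;> omega

theorem convertRange_nil (ranges : List (Int × Int)) : convertRange ranges [] = ranges := by
  simp [convertRange, rulesLoopA]

theorem convertRange_cons (ranges : List (Int × Int)) (d s z : Int) (rest : List (Int × Int × Int)) :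
    convertRange ranges ((d, s, z) :: rest) =
      (carveA d s (s + z) ranges).1 ++ convertRange (carveA d s (s + z) ranges).2 rest := by
  simp [convertRange, rulesLoopA]

theorem convertRange_cov (rules : List (Int × Int × Int)) (ranges : List (Int × Int)) (x : Int) :
    Cov (convertRange ranges rules) x ↔ ∃ y, Cov ranges y ∧ x = applyA rules y := by
  induction rules generalizing ranges with
  | nil =>
      rw [convertRange_nil]
      exact ⟨fun h => ⟨x, h, rfl⟩, fun ⟨y, hy, he⟩ => by simpa [applyA, he] using hy⟩
  | cons r rest ih =>
      obtain ⟨d, s, z⟩ := r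
      rw [convertRange_cons, Cov_append, carveA_locs_cov, ih]
      constructor
      · rintro (⟨y, hy, hm, rfl⟩ | ⟨y, hy, rfl⟩)
        · exact ⟨y, hy, by simp [applyA, hm]⟩
        · have h2 := (carveA_nrs_cov d s (s + z) ranges y).1 hy
          exact ⟨y, h2.1, by simp [applyA, h2.2]⟩
      · rintro ⟨y, hy, rfl⟩
        by_cases hm : s ≤ y ∧ y < s + z
        · exact Or.inl ⟨y, hy, hm, by simp [applyA, hm]⟩
        · exact Or.inr ⟨y, (carveA_nrs_cov d s (s + z) ranges y).2 ⟨hy, hm⟩, by simp [applyA, hm]⟩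

-- p is a source boundary of some rule
def isBoundary (rules : List (Int × Int × Int)) (p : Int) : Prop :=
  ∃ r ∈ rules, p = r.2.1 ∨ p = r.2.1 + r.2.2

-- the first-matching-rule shift is constant on an interval containing no rule boundary
theorem shiftFor_const (rules : List (Int × Int × Int)) (lo hi y : Int)
    (h1 : lo ≤ y) (h2 : y < hi)
    (hnb : ∀ p, isBoundary rules p → ¬(lo < p ∧ p < hi)) :
    shiftFor rules y = shiftFor rules lo := by
  induction rules with
  | nil => rfl
  | cons r rest ih =>
      obtain ⟨d, s, z⟩ := r
      have hs := hnb s ⟨(d, s, z), by simp⟩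
      have he := hnb (s + z) ⟨(d, s, z), by simp⟩
      have hcond : (s ≤ y ∧ y < s + z) ↔ (s ≤ lo ∧ lo < s + z) := by omega
      by_cases hm : s ≤ lo ∧ lo < s + z
      · simp [shiftFor, hm, hcond.2 hm]
      · have hm' : ¬(s ≤ y ∧ y < s + z) := fun h => hm (hcond.1 h)
        simp only [shiftFor, if_neg hm, if_neg hm']
        exact ih fun p hp => hnb p (by
          obtain ⟨r, hr, h⟩ := hp
          exact ⟨r, List.mem_cons_of_mem _ hr, h⟩)

theorem zipShift_cov (rules : List (Int × Int × Int)) (b : Int) :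
    ∀ (cs : List Int) (a x : Int),
      (∀ c ∈ cs, a < c ∧ c < b) →
      cs.Pairwise (· < ·) →
      (∀ p, isBoundary rules p → a < p → p < b → p ∈ cs) →
      (Cov (zipShift rules (a :: (cs ++ [b]))) x ↔
        ∃ y, (a ≤ y ∧ y < b) ∧ x = y + shiftFor rules y) := by
  intro cs
  induction cs with
  | nil =>
      intro a x _ _ hcomp
      have hc : ∀ y, a ≤ y → y < b → shiftFor rules y = shiftFor rules a := by
        intro y hy1 hy2
        exact shiftFor_const rules a b y hy1 hy2
          (fun p hp hin => by simpa using hcomp p hp hin.1 hin.2)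
      simp only [List.nil_append, zipShift, List.tail, List.zip, List.zipWith, List.map]
      constructor
      · intro h
        simp only [Cov, List.mem_singleton] at h
        obtain ⟨p, rfl, hp1, hp2⟩ := h
        refine ⟨x - shiftFor rules a, ⟨by omega, by omega⟩, ?_⟩
        have heq := hc (x - shiftFor rules a) (by omega) (by omega)
        omega
      · rintro ⟨y, ⟨hy1, hy2⟩, rfl⟩
        refine ⟨(a + shiftFor rules a, b + shiftFor rules a), by simp, ?_⟩
        rw [hc y hy1 hy2]
        constructor <;> omega
  | cons c cs ih =>
      intro a x hin hpw hcomp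
      have hcb : a < c ∧ c < b := hin c (by simp)
      have hstep : zipShift rules (a :: ((c :: cs) ++ [b])) =
          (a + shiftFor rules a, c + shiftFor rules a) :: zipShift rules (c :: (cs ++ [b])) := by
        simp [zipShift, List.zip]
      rw [hstep, Cov_cons]
      have hrest := ih c x
        (fun c' hc' => ⟨(List.pairwise_cons.1 hpw).1 c' hc', (hin c' (List.mem_cons_of_mem _ hc')).2⟩)
        (List.pairwise_cons.1 hpw).2
        (fun p hp h1 h2 => by
          have hm := List.mem_cons.1 (hcomp p hp (by omega) h2)
          rcases hm with h | h
          · omega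
          · exact h)
      rw [hrest]
      have hfst : ∀ y, a ≤ y → y < c → shiftFor rules y = shiftFor rules a := by
        intro y hy1 hy2
        refine shiftFor_const rules a c y hy1 hy2 (fun p hp hin2 => ?_)
        have hm := List.mem_cons.1 (hcomp p hp hin2.1 (by omega))
        rcases hm with h | h
        · omega
        · exact absurd ((List.pairwise_cons.1 hpw).1 p h) (by omega)
      constructor
      · rintro (⟨h1, h2⟩ | ⟨y, ⟨hy1, hy2⟩, rfl⟩)
        · refine ⟨x - shiftFor rules a, ⟨by omega, by omega⟩, ?_⟩
          have heq := hfst (x - shiftFor rules a) (by omega) (by omega)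
          omega
        · exact ⟨y, ⟨by omega, hy2⟩, rfl⟩
      · rintro ⟨y, ⟨hy1, hy2⟩, rfl⟩
        by_cases hyc : y < c
        · left
          rw [hfst y hy1 hyc]
          constructor <;> omega
        · exact Or.inr ⟨y, ⟨by omega, hy2⟩, rfl⟩

theorem mem_cutsB (rules : List (Int × Int × Int)) (a b p : Int) :
    p ∈ cutsB rules a b ↔ isBoundary rules p ∧ a < p ∧ p < b := by
  simp [cutsB, PySem.List.mem_sorted, PySem.Set.mem_ofList, List.mem_filter,
    List.mem_flatMap, isBoundary]

theorem mapSeg_cov (rules : List (Int × Int × Int)) (a b x : Int) :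
    Cov (mapSeg rules a b) x ↔ ∃ y, (a ≤ y ∧ y < b) ∧ x = y + shiftFor rules y := by
  refine zipShift_cov rules b (cutsB rules a b) a x ?_ ?_ ?_
  · intro c hc
    exact ((mem_cutsB rules a b c).1 hc).2
  · exact PySem.List.sorted_ofList_pairwise_lt _
  · intro p hp h1 h2
    exact (mem_cutsB rules a b p).2 ⟨hp, h1, h2⟩

theorem convertB_cov (rules : List (Int × Int × Int)) (segs : List (Int × Int)) (x : Int) :
    Cov (convertB segs rules) x ↔ ∃ y, Cov segs y ∧ x = y + shiftFor rules y := by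
  unfold convertB
  rw [PySem.List.foldl_append_eq_flatMap, List.nil_append]
  constructor
  · rintro ⟨p, hp, hp1, hp2⟩
    rw [List.mem_flatMap] at hp
    obtain ⟨seg, hseg, hmem⟩ := hp
    obtain ⟨y, hy, rfl⟩ := (mapSeg_cov rules seg.1 seg.2 x).1 ⟨p, hmem, hp1, hp2⟩
    exact ⟨y, ⟨seg, hseg, hy⟩, rfl⟩
  · rintro ⟨y, ⟨seg, hseg, hy⟩, rfl⟩
    obtain ⟨p, hmem, hp1, hp2⟩ := (mapSeg_cov rules seg.1 seg.2 _).2 ⟨y, hy, rfl⟩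
    exact ⟨p, List.mem_flatMap.2 ⟨seg, hseg, hmem⟩, hp1, hp2⟩

-- every interval in a list is non-degenerate
def WF (L : List (Int × Int)) : Prop := ∀ p ∈ L, p.1 < p.2

theorem mem_ifSingleton {α : Type} {c : Prop} [Decidable c] {q p : α}
    (h : p ∈ (if c then [q] else ([] : List α))) : c ∧ p = q := by
  split_ifs at h with hc
  · simp at h
    exact ⟨hc, h⟩
  · simp at h

theorem carveA_wf (d s e : Int) (rs : List (Int × Int)) :
    (∀ p ∈ (carveA d s e rs).1, p.1 < p.2) ∧ (∀ p ∈ (carveA d s e rs).2, p.1 < p.2) := by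
  induction rs with
  | nil => simp [carveA]
  | cons hd rest ih =>
      obtain ⟨a, b⟩ := hd
      constructor <;> intro p hp <;> simp only [carveA, List.mem_append] at hp
      · rcases hp with h | h
        · obtain ⟨hc, rfl⟩ := mem_ifSingleton h
          simp at hc ⊢
          omega
        · exact ih.1 p h
      · rcases hp with h | h
        · rcases h with h' | h' <;>
            · obtain ⟨hc, rfl⟩ := mem_ifSingleton h'
              exact hc
        · exact ih.2 p h

theorem convertRange_wf (rules : List (Int × Int × Int)) (ranges : List (Int × Int))
    (h : WF ranges) : WF (convertRange ranges rules) := by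
  induction rules generalizing ranges with
  | nil => rwa [convertRange_nil]
  | cons r rest ih =>
      obtain ⟨d, s, z⟩ := r
      rw [convertRange_cons]
      intro p hp
      rcases List.mem_append.1 hp with h' | h'
      · exact (carveA_wf d s (s + z) ranges).1 p h'
      · exact ih _ (carveA_wf d s (s + z) ranges).2 p h'

theorem foldlA_wf (sections : List (List (Int × Int × Int))) :
    ∀ L, WF L → WF (sections.foldl convertRange L) := by
  induction sections with
  | nil => exact fun L h => h
  | cons sec rest ih => exact fun L h => ih _ (convertRange_wf sec L h)

theorem zipShift_wf (rules : List (Int × Int × Int)) :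
    ∀ pts : List Int, pts.Pairwise (· < ·) → WF (zipShift rules pts) := by
  intro pts
  induction pts with
  | nil => intro _; simp [zipShift, WF]
  | cons a t ih =>
      cases t with
      | nil => intro _; simp [zipShift, WF]
      | cons c t' =>
          intro hpw
          have hstep : zipShift rules (a :: c :: t') =
              (a + shiftFor rules a, c + shiftFor rules a) :: zipShift rules (c :: t') := by
            simp [zipShift, List.zip]
          rw [hstep]
          intro p hp
          rcases List.mem_cons.1 hp with h | h
          · subst h
            have := (List.pairwise_cons.1 hpw).1 c (by simp)
            simp
            omega
          · exact ih (List.pairwise_cons.1 hpw).2 p h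

theorem mapSeg_wf (rules : List (Int × Int × Int)) (a b : Int) (hab : a < b) :
    WF (mapSeg rules a b) := by
  apply zipShift_wf
  rw [List.pairwise_cons]
  constructor
  · intro y hy
    rcases List.mem_append.1 hy with h | h
    · exact ((mem_cutsB rules a b y).1 h).2.1
    · simp at h
      omega
  · rw [List.pairwise_append]
    refine ⟨PySem.List.sorted_ofList_pairwise_lt _, by simp, ?_⟩
    intro c hc y hy
    simp at hy
    rw [hy]
    exact ((mem_cutsB rules a b c).1 hc).2.2

theorem convertB_wf (rules : List (Int × Int × Int)) (segs : List (Int × Int))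
    (h : WF segs) : WF (convertB segs rules) := by
  unfold convertB
  rw [PySem.List.foldl_append_eq_flatMap, List.nil_append]
  intro p hp
  obtain ⟨seg, hseg, hmem⟩ := List.mem_flatMap.1 hp
  exact mapSeg_wf rules seg.1 seg.2 (h seg hseg) p hmem

theorem foldlB_wf (sections : List (List (Int × Int × Int))) :
    ∀ L, WF L → WF (sections.foldl convertB L) := by
  induction sections with
  | nil => exact fun L h => h
  | cons sec rest ih => exact fun L h => ih _ (convertB_wf sec L h)

theorem foldl_cov_eq (sections : List (List (Int × Int × Int))) :
    ∀ (L M : List (Int × Int)), (∀ x, Cov L x ↔ Cov M x) →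
      ∀ x, Cov (sections.foldl convertRange L) x ↔ Cov (sections.foldl convertB M) x := by
  induction sections with
  | nil => exact fun L M h => h
  | cons sec rest ih =>
      intro L M h
      apply ih
      intro x
      rw [convertRange_cov, convertB_cov]
      constructor
      · rintro ⟨y, hy, rfl⟩
        exact ⟨y, (h y).1 hy, applyA_eq_shift sec y⟩
      · rintro ⟨y, hy, rfl⟩
        exact ⟨y, (h y).2 hy, (applyA_eq_shift sec y).symm⟩

theorem foldl_cov_nonempty (sections : List (List (Int × Int × Int))) :
    ∀ L, (∃ x, Cov L x) → ∃ x, Cov (sections.foldl convertRange L) x := by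
  induction sections with
  | nil => exact fun L h => h
  | cons sec rest ih =>
      rintro L ⟨x, hx⟩
      exact ih _ ⟨applyA sec x, (convertRange_cov sec L _).2 ⟨x, hx, rfl⟩⟩

theorem cov_ne_nil {L : List (Int × Int)} {x : Int} (h : Cov L x) : L ≠ [] := by
  obtain ⟨p, hp, _⟩ := h
  intro he
  subst he
  simp at hp

theorem foldMin_spec (t : List (Int × Int)) :
    ∀ x : Int × Int,
      (t.foldl (fun m y => if lexLt y m then y else m) x) ∈ x :: t ∧
      ∀ p ∈ x :: t, (t.foldl (fun m y => if lexLt y m then y else m) x).1 ≤ p.1 := by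
  induction t with
  | nil => exact fun x => ⟨by simp, by simp⟩
  | cons y t ih =>
      intro x
      have step : (y :: t).foldl (fun m y => if lexLt y m then y else m) x =
          t.foldl (fun m y => if lexLt y m then y else m) (if lexLt y x then y else x) := rfl
      obtain ⟨hmem, hbound⟩ := ih (if lexLt y x then y else x)
      constructor
      · rw [step]
        rcases List.mem_cons.1 hmem with h | h
        · rw [h]
          split_ifs <;> simp
        · simp [h]
      · intro p hp
        rw [step]
        have hle1 : (if lexLt y x then y else x).1 ≤ x.1 := by
          split_ifs with hc
          · simp [lexLt] at hc
            omega
          · exact le_refl _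
        have hle2 : (if lexLt y x then y else x).1 ≤ y.1 := by
          split_ifs with hc
          · exact le_refl _
          · simp [lexLt] at hc
            omega
        have hself := hbound (if lexLt y x then y else x) (List.mem_cons_self ..)
        rcases List.mem_cons.1 hp with h | h
        · subst h; omega
        · rcases List.mem_cons.1 h with h' | h'
          · subst h'; omega
          · exact hbound p (by simp [h'])

theorem minPair?_spec (l : List (Int × Int)) (h : l ≠ []) :
    ∃ m, minPair? l = some m ∧ m ∈ l ∧ ∀ p ∈ l, m.1 ≤ p.1 := by
  cases l with
  | nil => exact absurd rfl h
  | cons x t => exact ⟨_, rfl, foldMin_spec t x⟩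

theorem minStartB_spec (l : List (Int × Int)) (h : l ≠ []) :
    (∃ q ∈ l, minStartB l = q.1) ∧ ∀ p ∈ l, minStartB l ≤ p.1 := by
  cases l with
  | nil => exact absurd rfl h
  | cons p t =>
      have heq : minStartB (p :: t) = (t.map Prod.fst).foldl min p.1 := by
        simp [minStartB, List.foldl_map]
      constructor
      · rw [heq]
        rcases PySem.List.foldl_min_mem (t.map Prod.fst) p.1 with h' | h'
        · exact ⟨p, by simp, h'⟩
        · obtain ⟨q, hq, hq'⟩ := List.mem_map.1 h'
          exact ⟨q, by simp [hq], hq'.symm⟩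
      · intro q hq
        rw [heq]
        rcases List.mem_cons.1 hq with h' | h'
        · subst h'
          exact (PySem.List.foldl_min_le _ _).1
        · exact (PySem.List.foldl_min_le _ _).2 q.1 (List.mem_map_of_mem h')

theorem foldlA_empty_sections (sections : List (List (Int × Int × Int)))
    (h : ∀ sec ∈ sections, sec = []) (L : List (Int × Int)) :
    sections.foldl convertRange L = L := by
  induction sections generalizing L with
  | nil => rfl
  | cons sec rest ih =>
      have hsec : sec = [] := h sec (by simp)
      subst hsec
      rw [List.foldl_cons, convertRange_nil]
      exact ih (fun s hs => h s (by simp [hs])) L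

theorem convertB_empty (L : List (Int × Int)) : convertB L [] = L := by
  unfold convertB
  rw [PySem.List.foldl_append_eq_flatMap, List.nil_append]
  have hms : (fun ab : Int × Int => mapSeg [] ab.1 ab.2) = fun ab => [(ab.1, ab.2)] := by
    funext ab
    simp [mapSeg, cutsB, zipShift, shiftFor, List.zip, PySem.List.sorted, PySem.Set.ofList]
  rw [hms]
  simp

theorem foldlB_empty_sections (sections : List (List (Int × Int × Int)))
    (h : ∀ sec ∈ sections, sec = []) (L : List (Int × Int)) :
    sections.foldl convertB L = L := by
  induction sections generalizing L with
  | nil => rfl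
  | cons sec rest ih =>
      have hsec : sec = [] := h sec (by simp)
      subst hsec
      rw [List.foldl_cons, convertB_empty]
      exact ih (fun s hs => h s (by simp [hs])) L

theorem inner_eq (sections : List (List (Int × Int × Int))) (s z : Int)
    (h : 0 < z ∨ ∀ sec ∈ sections, sec = []) :
    minLocA sections (s, z) = some (minStartB (sections.foldl convertB [(s, s + z)])) := by
  rcases h with hz | hempty
  · have hcov : ∀ x, Cov (sections.foldl convertRange [(s, s + z)]) x ↔
        Cov (sections.foldl convertB [(s, s + z)]) x :=
      foldl_cov_eq sections _ _ (fun _ => Iff.rfl)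
    obtain ⟨x0, hx0⟩ := foldl_cov_nonempty sections [(s, s + z)] ⟨s, (s, s + z), by simp, by omega⟩
    have hLAne := cov_ne_nil hx0
    have hLBne := cov_ne_nil ((hcov x0).1 hx0)
    have hwf0 : WF [(s, s + z)] := by
      intro p hp
      simp at hp
      subst hp
      simpa using hz
    have hwfA := foldlA_wf sections _ hwf0
    have hwfB := foldlB_wf sections _ hwf0
    obtain ⟨m, hm, hmem, hbound⟩ := minPair?_spec _ hLAne
    obtain ⟨⟨q, hq, hqeq⟩, hbB⟩ := minStartB_spec _ hLBne
    have h1 : Cov (sections.foldl convertRange [(s, s + z)]) m.1 :=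
      ⟨m, hmem, le_refl _, hwfA m hmem⟩
    have h2 : Cov (sections.foldl convertB [(s, s + z)]) q.1 :=
      ⟨q, hq, le_refl _, hwfB q hq⟩
    have hle1 : minStartB (sections.foldl convertB [(s, s + z)]) ≤ m.1 := by
      obtain ⟨p, hp, hp1, _⟩ := (hcov m.1).1 h1
      exact le_trans (hbB p hp) hp1
    have hle2 : m.1 ≤ minStartB (sections.foldl convertB [(s, s + z)]) := by
      rw [hqeq]
      obtain ⟨p, hp, hp1, _⟩ := (hcov q.1).2 h2
      exact le_trans (hbound p hp) hp1
    simp [minLocA, hm]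
    omega
  · rw [foldlB_empty_sections sections hempty]
    simp [minLocA, foldlA_empty_sections sections hempty, minPair?, minStartB]

theorem foldOptMin (vs : List Int) :
    ∀ v : Int,
      ((vs.map some).foldl (fun acc w =>
          match acc, w with
          | some m, some x => some (if x < m then x else m)
          | _, _ => none) (some v)) = some (vs.foldl min v) := by
  induction vs with
  | nil => intro v; rfl
  | cons x t ih =>
      intro v
      have : (if x < v then x else v) = min v x := by
        split_ifs <;> omega
      simp only [List.map_cons, List.foldl_cons, this]
      exact ih (min v x)

theorem oddIdx_iff_pairs_aux :
    ∀ (seeds : List Int) (n : Nat),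
      (∀ z ∈ seeds.zipIdx (2 * n), z.2 % 2 = 1 → 0 < z.1) ↔
        (∀ p ∈ seedPairs seeds, 0 < p.2) := by
  intro seeds
  induction seeds using seedPairs.induct with
  | case1 a b rest ih =>
      intro n
      have h2 : 2 * n + 1 + 1 = 2 * (n + 1) := by omega
      simp only [List.zipIdx_cons, h2, seedPairs, List.mem_cons, forall_eq_or_imp]
      rw [ih (n + 1)]
      constructor
      · rintro ⟨_, hb, hrest⟩
        exact ⟨hb (by omega), hrest⟩
      · rintro ⟨hb, hrest⟩
        exact ⟨by intro h; omega, fun _ => hb, hrest⟩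
  | case2 seeds h1 =>
      intro n
      match seeds, h1 with
      | [], _ => simp [seedPairs]
      | [a], _ => simp [seedPairs, List.zipIdx_cons]
      | a :: b :: rest, h1 => exact absurd rfl (fun h => h1 a b rest h)

theorem seedPairs_ne_nil {seeds : List Int} (h : 2 ≤ seeds.length) :
    seedPairs seeds ≠ [] := by
  match seeds with
  | [] => simp at h
  | [a] => simp at h
  | a :: b :: rest => simp [seedPairs]

-- ===== VERDICT (by name: the statement is the Claim_ definition above) =====
theorem day05_part2_spec : Claim_equal_day05_part2 := by
  rintro ⟨seeds, sections⟩ _ ⟨hlen, hpre⟩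
  unfold Spec_day05_part2 day05_part2 day05_part2_alt
  simp only
  have hpairs : ∀ sr ∈ seedPairs seeds,
      minLocA sections sr =
        some (minStartB (sections.foldl convertB [(sr.1, sr.1 + sr.2)])) := by
    rintro ⟨s, z⟩ hsr
    rcases hpre with hpos | hempty
    · have hpos' : ∀ p ∈ seedPairs seeds, 0 < p.2 :=
        (oddIdx_iff_pairs_aux seeds 0).1 (by simpa using hpos)
      exact inner_eq sections s z (Or.inl (hpos' (s, z) hsr))
    · exact inner_eq sections s z (Or.inr hempty)
  have hmap : (seedPairs seeds).map (minLocA sections) =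
      (seedPairs seeds).map (fun sr =>
        some (minStartB (sections.foldl convertB [(sr.1, sr.1 + sr.2)]))) :=
    List.map_congr_left hpairs
  rw [hmap]
  cases hp : seedPairs seeds with
  | nil => exact absurd hp (seedPairs_ne_nil hlen)
  | cons sr rest =>
      simp only [List.map_cons]
      rw [show rest.map (fun sr =>
            some (minStartB (sections.foldl convertB [(sr.1, sr.1 + sr.2)]))) =
          (rest.map (fun sr =>
            minStartB (sections.foldl convertB [(sr.1, sr.1 + sr.2)]))).map some by
        simp [List.map_map]]
      rw [foldOptMin]
      rfl
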